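-- pv_equiv track=rewrite | github.com/nicoreadm/Cotizacion-Dolar-con-web-scraping-python | CDTR - Web Scraping- Tkinter/calculadora.py | convertir_float
-- ===== SOURCE A (Python) =====
-- def convertir_float(valor):
--   valor = valor.replace('.','')
--   valor= valor[::-1]
--   i=0
--   valor2=''
--   for caracter in valor:
--     valor2=valor2+caracter
--     i+=1
--     if i ==2:
--       valor2=valor2+'.'
--
--   valor2= valor2[::-1]
--   return valor2
-- ===== SOURCE B (Python) =====
-- def convertir_float(valor):
--     s = valor.replace('.', '')
--     if len(s) < 2:
--         return s
--     return s[:-2] + '.' + s[-2:]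
-- ===== Notes on version B (the rewrite author's own statement) =====
-- stated objective: simpler
-- what changed: Replaces A's reverse / per-character accumulation loop with counter / reverse-back pipeline by one closed-form computation: strip the dots, then splice a decimal point before the last two characters with two slices (strings shorter than two characters are returned unchanged, as A does).
import Mathlib
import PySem

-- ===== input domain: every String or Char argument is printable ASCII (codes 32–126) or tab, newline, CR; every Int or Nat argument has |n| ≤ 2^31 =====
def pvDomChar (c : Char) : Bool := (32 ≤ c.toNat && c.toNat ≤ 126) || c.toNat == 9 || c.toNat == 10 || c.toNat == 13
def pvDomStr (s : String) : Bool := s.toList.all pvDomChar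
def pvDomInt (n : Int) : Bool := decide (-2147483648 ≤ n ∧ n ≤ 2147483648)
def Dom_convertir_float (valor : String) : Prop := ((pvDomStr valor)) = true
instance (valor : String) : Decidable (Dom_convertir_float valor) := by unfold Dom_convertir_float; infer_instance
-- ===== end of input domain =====

-- B replaces A's reverse / per-character loop with a counter / reverse-back pipeline by one closed-form slice (simpler).

-- ===== PORT A =====
-- one step of A's for-loop: state (i, valor2)
def convAStep (st : Int × List Char) (c : Char) : Int × List Char :=
  let v2 := st.2 ++ [c]
  let i := st.1 + 1
  if i == 2 then (i, v2 ++ ['.']) else (i, v2)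

def convertir_float (valor : String) : String :=
  let v := (PySem.Str.replace valor "." "").toList
  let v := (PySem.List.slice? v none none (-1)).getD []   -- valor[::-1]
  let r := v.foldl convAStep (0, [])
  let v2 := (PySem.List.slice? r.2 none none (-1)).getD []  -- valor2[::-1]
  String.ofList v2

-- ===== PORT B =====
def convertir_float_alt (valor : String) : String :=
  let s := (PySem.Str.replace valor "." "").toList
  if s.length < 2 then String.ofList s
  else String.ofList (PySem.List.slice s none (some (-2)) ++ '.' :: PySem.List.slice s (some (-2)) none)

-- ===== PRECONDITION & SPEC =====
def Spec_convertir_float (valor : String) (out : String) : Prop := out = convertir_float_alt valor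
instance (valor : String) (out : String) : Decidable (Spec_convertir_float valor out) := by unfold Spec_convertir_float; infer_instance

-- ===== CLAIM (what is proved, stated in full; the proofs are below) =====
def Claim_equal_convertir_float : Prop := ∀ (valor : String), Dom_convertir_float valor → Spec_convertir_float valor (convertir_float valor)

-- ===== LEMMAS AND PROOFS =====

-- once i ≥ 2, the 'if i == 2' branch never fires again: the loop just appends
theorem convAStep_foldl_ge2 (l : List Char) (i : Int) (acc : List Char) (h : 2 ≤ i) :
    l.foldl convAStep (i, acc) = (i + l.length, acc ++ l) := by
  induction l generalizing i acc with
  | nil => simp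
  | cons c t ih =>
      have : ¬ (i + 1 == 2) = true := by simp; omega
      simp [List.foldl_cons, convAStep, this, ih (i+1) (acc ++ [c]) (by omega)]
      omega

-- A's loop, started fresh, inserts '.' after the first two characters
theorem convAStep_main (l : List Char) :
    (l.foldl convAStep (0, [])).2 =
      if l.length < 2 then l else l.take 2 ++ '.' :: l.drop 2 := by
  match l with
  | [] => simp
  | [a] => simp [convAStep]
  | a :: b :: t =>
      have h1 : (a :: b :: t).foldl convAStep (0, []) = t.foldl convAStep (2, [a, b, '.']) := by
        simp [convAStep]
      rw [h1, convAStep_foldl_ge2 t 2 [a, b, '.'] (by omega)]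
      simp

theorem convertir_float_spec : Claim_equal_convertir_float := by
  intro valor _
  unfold Spec_convertir_float convertir_float convertir_float_alt
  set s := (PySem.Str.replace valor "." "").toList with hs
  simp only [PySem.List.slice?_none_none_neg_one, Option.getD_some]
  rw [convAStep_main]
  by_cases h : s.length < 2
  · simp [h]
  · have hlen : 2 ≤ s.length := by omega
    have hrl : s.reverse.length = s.length := by simp
    simp only [hrl, h, if_false]
    rw [PySem.List.slice_to_neg_ofNat s 2 (by omega), PySem.List.slice_from_neg_ofNat s 2 (by omega)]
    have htake : (s.reverse.take 2).reverse = s.drop (s.length - 2) := by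
      rw [List.take_reverse]
      simp
    have hdrop : (s.reverse.drop 2).reverse = s.take (s.length - 2) := by
      rw [List.drop_reverse]
      simp
    simp only [List.reverse_append, List.reverse_cons, hdrop, htake]
    simp
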